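-- pv_equiv track=rewrite | github.com/OpenPecha/rag_prep_tool | src/rag_prep_tool/preprocessing/clean_text.py | remove_substring_from_text
-- ===== SOURCE A (Python) =====
-- def remove_substring_from_text(text:str, substring:str)->str:
--     """ removes the substring from the text """
--     """ exclude the new lines and spaces"""
--     """ substring should start from the beginning of the text"""
--     sub_string_len = len(substring)
--     count = 0
--     for idx,char in enumerate(text):
--         if char in ["\n", " "]:
--             continue
--         count += 1
--         if count == sub_string_len:
--             return text[idx+1:]
--     return text
-- ===== SOURCE B (Python) =====
-- def remove_substring_from_text(text: str, substring: str) -> str: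
--     """Strip-and-drop decomposition: loop over the substring's characters;
--     each step lstrips ' ' and '\n' from the remaining text and drops one
--     character; no index or counter over text is kept."""
--     rest = text
--     for _ in substring:
--         rest = rest.lstrip(" \n")
--         if not rest:
--             return text
--         rest = rest[1:]
--     return rest
-- ===== Notes on version B (the rewrite author's own statement) =====
-- stated objective: alternative
-- what changed: A does one indexed scan of text with enumerate, counting non-whitespace characters and early-returning a slice text[idx+1:]; B keeps no index or counter at all: it loops once per character of the substring, each step lstrip-ping ' ' and ' ' off the remaining text and dropping one character, and returns the remainder (or the original text if it runs out).
import Mathlib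
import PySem

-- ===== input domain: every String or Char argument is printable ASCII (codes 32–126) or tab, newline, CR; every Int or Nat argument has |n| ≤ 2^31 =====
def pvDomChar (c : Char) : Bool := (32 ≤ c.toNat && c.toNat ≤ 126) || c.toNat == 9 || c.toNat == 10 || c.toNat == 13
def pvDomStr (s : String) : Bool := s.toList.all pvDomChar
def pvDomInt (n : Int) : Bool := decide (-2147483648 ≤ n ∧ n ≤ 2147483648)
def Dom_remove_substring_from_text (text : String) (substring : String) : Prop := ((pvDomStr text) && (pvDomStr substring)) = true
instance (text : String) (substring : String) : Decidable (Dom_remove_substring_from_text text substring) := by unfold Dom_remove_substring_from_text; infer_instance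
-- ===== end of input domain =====

-- B replaces A's indexed counting scan by a loop over the substring that repeatedly
-- lstrips ' '/'\n' and drops one character of the remaining text (alternative decomposition, same cost).

-- ===== PORT A =====
-- the 'for idx,char in enumerate(text)' loop; state: current index and count.
-- text[idx+1:] with idx+1 >= 0 is exactly dropping idx+1 characters.
def pvAloop (text : List Char) (sublen : Nat) : List Char → Nat → Nat → String
  | [], _, _ => String.mk text
  | c :: rest, idx, count =>
    if c = '\n' ∨ c = ' ' then pvAloop text sublen rest (idx + 1) count
    else if count + 1 = sublen then String.mk (text.drop (idx + 1))
    else pvAloop text sublen rest (idx + 1) (count + 1)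

def remove_substring_from_text (text : String) (substring : String) : String :=
  pvAloop text.toList substring.length text.toList 0 0

-- ===== PORT B =====
-- the 'for _ in substring' loop; state: 'rest', the remaining suffix of text.
-- rest.lstrip(" \n") removes exactly the leading ' '/'\n' characters: dropWhile is exact here.
def pvBloop (orig : List Char) : List Char → List Char → String
  | [], rest => String.mk rest
  | _ :: sub, rest =>
    match rest.dropWhile (fun c => c == ' ' || c == '\n') with
    | [] => String.mk orig
    | _ :: r => pvBloop orig sub r

def remove_substring_from_text_alt (text : String) (substring : String) : String :=
  pvBloop text.toList substring.toList text.toList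

-- ===== PRECONDITION & SPEC =====
def Spec_remove_substring_from_text (text : String) (substring : String) (out : String) : Prop := out = remove_substring_from_text_alt text substring
instance (text : String) (substring : String) (out : String) : Decidable (Spec_remove_substring_from_text text substring out) := by unfold Spec_remove_substring_from_text; infer_instance

-- ===== CLAIM (what is proved, stated in full; the proofs are below) =====
def Claim_equal_remove_substring_from_text : Prop := ∀ (text : String) (substring : String), Dom_remove_substring_from_text text substring → Spec_remove_substring_from_text text substring (remove_substring_from_text text substring)

-- ===== LEMMAS AND PROOFS =====

-- ===== VERDICT (by name: the statement is the Claim_ definition above) =====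
-- with sublen = 0 A's early return never fires
theorem pvAloop_zero (text : List Char) :
    ∀ (l : List Char) (idx count : Nat), pvAloop text 0 l idx count = String.mk text := by
  intro l
  induction l with
  | nil => intro idx count; rfl
  | cons c rest ih =>
    intro idx count
    simp only [pvAloop]
    split_ifs with h1 h2
    · exact ih _ _
    · exact h2.elim
    · exact ih _ _

-- main lemma: on a suffix t of text, A's counting loop with sub.length counts left
-- equals B's strip-and-drop recursion over sub
theorem pvAB (text : List Char) :
    ∀ (t : List Char) (sub : List Char) (idx count : Nat), sub ≠ [] →
      List.drop idx text = t →
      pvAloop text (count + sub.length) t idx count = pvBloop text sub t := by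
  intro t
  induction t with
  | nil =>
    intro sub idx count hsub _
    cases sub with
    | nil => exact (hsub rfl).elim
    | cons s sub' => simp [pvAloop, pvBloop]
  | cons c rest ih =>
    intro sub idx count hsub hdrop
    cases sub with
    | nil => exact (hsub rfl).elim
    | cons s sub' =>
      have hrest : List.drop (idx + 1) text = rest := by
        rw [← List.tail_drop, hdrop]; rfl
      by_cases hws : c = ' ' ∨ c = '\n'
      · have hws' : c = '\n' ∨ c = ' ' := hws.symm
        have hb : (c :: rest).dropWhile (fun c => c == ' ' || c == '\n')
            = rest.dropWhile (fun c => c == ' ' || c == '\n') := by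
          rcases hws with h | h <;> simp [List.dropWhile, h]
        simp only [pvAloop, if_pos hws', pvBloop, hb]
        rw [ih (s :: sub') (idx + 1) count hsub hrest]
        simp [pvBloop]
      · have hws' : ¬ (c = '\n' ∨ c = ' ') := fun h => hws h.symm
        have hb : (c :: rest).dropWhile (fun c => c == ' ' || c == '\n') = c :: rest := by
          have hfalse : (c == ' ' || c == '\n') = false := by
            simp only [Bool.or_eq_false_iff, beq_eq_false_iff_ne, ne_eq]
            exact ⟨fun h => hws (Or.inl h), fun h => hws (Or.inr h)⟩
          simp [List.dropWhile, hfalse]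
        simp only [pvAloop, if_neg hws', pvBloop, hb]
        cases sub' with
        | nil =>
          simp [pvBloop, hrest]
        | cons s2 sub'' =>
          have hne : ¬ count + 1 = count + (s :: s2 :: sub'').length := by
            simp only [List.length_cons]; omega
          rw [if_neg hne]
          have harith : count + (s :: s2 :: sub'').length = (count + 1) + (s2 :: sub'').length := by
            simp only [List.length_cons]; omega
          rw [harith, ih (s2 :: sub'') (idx + 1) (count + 1) (by simp) hrest]

-- ===== VERDICT (by name: the statement is the Claim_ definition above) =====
theorem remove_substring_from_text_spec : Claim_equal_remove_substring_from_text := by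
  intro text substring _
  unfold Spec_remove_substring_from_text remove_substring_from_text remove_substring_from_text_alt
  cases hsub : substring.toList with
  | nil =>
    have hlen : substring.length = 0 := by
      rw [← String.length_toList, hsub]; rfl
    rw [hlen, pvAloop_zero, pvBloop]
  | cons s sub' =>
    have hlen : substring.length = (s :: sub').length := by
      rw [← String.length_toList, hsub]
    rw [hlen]
    have := pvAB text.toList text.toList (s :: sub') 0 0 (by simp) (by simp)
    simpa using this
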